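-- pv_equiv track=rewrite | github.com/Vladimir-82/2020_1_homework_4 | even.py | prog
-- ===== SOURCE A (Python) =====
-- def prog(some_list):
--     even_list=[]
--     for i in some_list:
--         if i%2==0:
--             even_list.append(i)
--         if i==237:
--             break
--     return even_list
-- ===== SOURCE B (Python) =====
-- def prog(some_list):
--     try:
--         prefix = some_list[:some_list.index(237)]
--     except ValueError:
--         prefix = some_list
--     return [x for x in prefix if x % 2 == 0]
-- ===== Notes on version B (the rewrite author's own statement) =====
-- stated objective: simpler
-- what changed: Replaces the interleaved append-and-break loop with two separate phases: locate 237 via list.index to cut a prefix, then a single filtering comprehension over that prefix.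
import Mathlib
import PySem

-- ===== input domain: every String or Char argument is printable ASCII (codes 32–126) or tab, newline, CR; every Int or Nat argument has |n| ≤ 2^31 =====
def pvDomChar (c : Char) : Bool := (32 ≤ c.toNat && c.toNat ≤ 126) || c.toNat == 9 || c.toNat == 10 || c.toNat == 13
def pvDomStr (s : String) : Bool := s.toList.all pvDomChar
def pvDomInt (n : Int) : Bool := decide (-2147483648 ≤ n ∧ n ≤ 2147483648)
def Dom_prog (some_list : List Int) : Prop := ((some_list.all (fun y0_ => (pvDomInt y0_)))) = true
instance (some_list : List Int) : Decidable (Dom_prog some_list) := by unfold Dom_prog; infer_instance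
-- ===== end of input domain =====

-- B separates finding the 237 boundary (index + slice) from filtering evens; same values, simpler decomposition.


-- ===== PORT A =====
-- loop with append and break, transliterated as structural recursion
def prog (some_list : List Int) : List Int :=
  match some_list with
  | [] => []
  | i :: rest =>
      (if PySem.Int.mod i 2 == 0 then [i] else []) ++
      (if i == 237 then [] else prog rest)

-- ===== PORT B =====
def prog_alt (some_list : List Int) : List Int :=
  (match PySem.List.index? some_list 237 with
   | some idx => PySem.List.slice some_list none (some (idx : Int))
   | none => some_list).filter (fun x => PySem.Int.mod x 2 == 0)

-- ===== PRECONDITION & SPEC =====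
def Spec_prog (some_list : List Int) (out : List Int) : Prop := out = prog_alt some_list
instance (some_list : List Int) (out : List Int) : Decidable (Spec_prog some_list out) := by unfold Spec_prog; infer_instance

-- ===== CLAIM (what is proved, stated in full; the proofs are below) =====
def Claim_equal_prog : Prop := ∀ (some_list : List Int), Dom_prog some_list → Spec_prog some_list (prog some_list)

-- ===== LEMMAS AND PROOFS =====

lemma prog_alt_cons_ne (i : Int) (t : List Int) (h : i ≠ 237) :
    prog_alt (i :: t) =
      (if PySem.Int.mod i 2 == 0 then [i] else []) ++ prog_alt t := by
  unfold prog_alt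
  rw [PySem.List.index?_cons_of_ne t h]
  cases hk : PySem.List.index? t 237 with
  | none =>
      simp [List.filter_cons]
      split <;> simp
  | some k =>
      simp only [Option.map_some]
      rw [PySem.List.slice_to_natCast, PySem.List.slice_to_natCast]
      simp [List.filter_cons]
      split <;> simp

lemma prog_eq (l : List Int) : prog l = prog_alt l := by
  induction l with
  | nil => simp [prog, prog_alt]
  | cons i t ih =>
      by_cases h : i = 237
      · subst h
        unfold prog prog_alt
        rw [PySem.List.index?_cons_self]
        simp [PySem.List.slice]
      · have hb : (i == 237) = false := by simp [h]
        rw [prog_alt_cons_ne i t h]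
        simp [prog, hb, ih]

-- ===== VERDICT (by name: the statement is the Claim_ definition above) =====
theorem prog_spec : Claim_equal_prog := by
  intro l _
  exact prog_eq l
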